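-- pv_equiv track=rewrite | github.com/LobaDK/PythonData-24103dap | øvelser/e18_acronyms/src/acronyms.py | acronyms
-- ===== SOURCE A (Python) =====
-- from string import ascii_lowercase
--
-- def acronyms(s: str) -> list[str]:
--     for chr in ascii_lowercase + ".,()":
--         if chr in s:
--             s = s.replace(chr, "")
--
--     acronyms: list[str] = []
--     for potential_acronym in s.split():
--         if len(potential_acronym) >= 2 and any(
--             [char.isalpha() for char in potential_acronym]
--         ):
--             acronyms.append(potential_acronym)
--
--     return acronyms
-- ===== SOURCE B (Python) =====
-- from string import ascii_lowercase
--
-- def acronyms(s: str) -> list[str]: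
--     drop = set(ascii_lowercase + ".,()")
--     result: list[str] = []
--     cur: list[str] = []
--     for c in s:
--         if c in drop:
--             continue
--         if c.isspace():
--             if len(cur) >= 2 and any(ch.isalpha() for ch in cur):
--                 result.append(''.join(cur))
--             cur = []
--         else:
--             cur.append(c)
--     if len(cur) >= 2 and any(ch.isalpha() for ch in cur):
--         result.append(''.join(cur))
--     return result
-- ===== Notes on version B (the rewrite author's own statement) =====
-- stated objective: alternative
-- what changed: A does up to 30 sequential guarded str.replace passes, then splits the cleaned string and filters the tokens in two more passes; B is a single-pass state machine over the original string with a current-token accumulator that skips dropped characters and flushes qualifying tokens at whitespace boundaries, never materialising a cleaned string or a full token list.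
import Mathlib
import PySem

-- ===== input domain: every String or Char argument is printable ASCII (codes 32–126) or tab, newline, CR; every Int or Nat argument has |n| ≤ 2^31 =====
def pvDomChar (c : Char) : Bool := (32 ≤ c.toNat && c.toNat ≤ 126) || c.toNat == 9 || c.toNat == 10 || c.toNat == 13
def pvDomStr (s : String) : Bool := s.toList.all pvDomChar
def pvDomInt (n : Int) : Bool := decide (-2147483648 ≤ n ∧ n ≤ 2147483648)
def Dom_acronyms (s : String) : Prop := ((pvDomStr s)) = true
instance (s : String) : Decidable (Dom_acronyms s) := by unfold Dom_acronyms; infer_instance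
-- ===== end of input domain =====

-- A strips 30 characters with sequential guarded str.replace passes, then splits and filters the
-- tokens in further passes; B is a single-pass state machine with a current-token accumulator that
-- skips dropped characters and flushes qualifying tokens at whitespace (objective: alternative).

-- the characters to strip: ascii_lowercase + ".,()"
def acrRemove : List Char := "abcdefghijklmnopqrstuvwxyz.,()".toList

-- ===== PORT A =====
def acronyms (s : String) : List String :=
  let s2 := acrRemove.foldl
    (fun t c =>
      if PySem.Str.isIn (String.ofList [c]) t then PySem.Str.replace t (String.ofList [c]) "" else t)
    s
  (PySem.Str.split₀ s2).foldl
    (fun acc w =>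
      if 2 ≤ PySem.Str.len w ∧ (w.toList.map (fun ch => PySem.Chars.isalpha ch)).any id
      then acc ++ [w] else acc)
    []

-- ===== PORT B =====
-- B's drop-set, built once (Python: set(ascii_lowercase + ".,()"))
def acrDrop : PySem.Set Char := PySem.Set.ofList acrRemove

-- B's loop body: skip dropped chars; at whitespace flush the current token if it qualifies;
-- otherwise extend the current token
def acrStep (st : List String × List Char) (c : Char) : List String × List Char :=
  if acrDrop.contains c then st
  else if PySem.Chars.isspace c then
    (if 2 ≤ st.2.length ∧ st.2.any PySem.Chars.isalpha
     then st.1 ++ [String.ofList st.2] else st.1, [])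
  else (st.1, st.2 ++ [c])

def acronyms_alt (s : String) : List String :=
  let st := s.toList.foldl acrStep ([], [])
  if 2 ≤ st.2.length ∧ st.2.any PySem.Chars.isalpha
  then st.1 ++ [String.ofList st.2] else st.1

-- ===== PRECONDITION & SPEC =====
def Spec_acronyms (s : String) (out : List String) : Prop := out = acronyms_alt s
instance (s : String) (out : List String) : Decidable (Spec_acronyms s out) := by unfold Spec_acronyms; infer_instance

-- ===== CLAIM (what is proved, stated in full; the proofs are below) =====
def Claim_equal_acronyms : Prop := ∀ (s : String), Dom_acronyms s → Spec_acronyms s (acronyms s)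

-- ===== LEMMAS AND PROOFS =====

-- ---- A-side: the 30 guarded replace passes compute one membership filter ----

-- replace.go with old = [c], new = [] and enough fuel filters c out
lemma acr_replace_go_filter (c : Char) : ∀ (fuel : Nat) (l acc : List Char), l.length ≤ fuel →
    PySem.Chars.replace.go [c] [] fuel l acc = acc.reverse ++ l.filter (fun x => x != c) := by
  intro fuel
  induction fuel with
  | zero =>
    intro l acc h
    have : l = [] := List.eq_nil_of_length_eq_zero (Nat.le_zero.mp h)
    subst this
    simp [PySem.Chars.replace.go]
  | succ n ih =>
    intro l acc h
    cases l with
    | nil => simp [PySem.Chars.replace.go]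
    | cons a t =>
      by_cases hac : c = a
      · subst hac
        have hpre : List.isPrefixOf [c] (c :: t) = true := by
          simp [List.isPrefixOf]
        simp only [PySem.Chars.replace.go, hpre, if_pos, List.length_cons, List.drop_succ_cons,
          List.length_nil, List.drop_zero, List.reverse_nil, List.nil_append]
        rw [ih t acc (by simpa using Nat.le_of_succ_le_succ h)]
        simp
      · have hpre : List.isPrefixOf [c] (a :: t) = false := by
          simp [List.isPrefixOf, hac]
        simp only [PySem.Chars.replace.go, hpre]
        rw [ih t (a :: acc) (by simpa using Nat.le_of_succ_le_succ h)]
        simp [Ne.symm hac]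

lemma acr_replace_single (c : Char) (s : List Char) :
    PySem.Chars.replace s [c] [] = s.filter (fun x => x != c) := by
  rw [PySem.Chars.replace]
  rw [if_neg (by simp)]
  exact acr_replace_go_filter c s.length s [] (le_refl _)

-- A's guarded replace step is plain filtering, whether or not c occurs
lemma acr_step_chars (t : List Char) (c : Char) :
    (if PySem.Chars.isIn [c] t then PySem.Chars.replace t [c] [] else t)
      = t.filter (fun x => x != c) := by
  by_cases h : PySem.Chars.isIn [c] t = true
  · rw [if_pos h, acr_replace_single]
  · rw [if_neg h]
    have hnf : ¬ ([c] <:+: t) := by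
      intro hin
      exact h ((PySem.Chars.isIn_iff_infix [c] t).mpr hin)
    have hmem : c ∉ t := by
      intro hc
      apply hnf
      obtain ⟨l1, l2, rfl⟩ := List.append_of_mem hc
      exact ⟨l1, l2, by simp⟩
    symm
    apply List.filter_eq_self.mpr
    intro a ha
    simp only [bne_iff_ne, ne_eq]
    intro hEq; exact hmem (hEq ▸ ha)

-- folding single-char filters over L filters by membership in L
lemma acr_foldl_filter (L : List Char) : ∀ (t : List Char),
    L.foldl (fun t c => t.filter (fun x => x != c)) t
      = t.filter (fun x => !(L.contains x)) := by
  induction L with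
  | nil => intro t; simp
  | cons c L ih =>
    intro t
    simp only [List.foldl_cons]
    rw [ih, List.filter_filter]
    apply List.filter_congr
    intro x _
    simp [bne, beq_eq_decide, eq_comm, Bool.and_comm]

-- the String-level removal fold computes the Chars-level one
lemma acr_foldl_toList (L : List Char) : ∀ (s : String),
    (L.foldl
      (fun t c =>
        if PySem.Str.isIn (String.ofList [c]) t then PySem.Str.replace t (String.ofList [c]) "" else t)
      s).toList
    = L.foldl (fun t c => if PySem.Chars.isIn [c] t then PySem.Chars.replace t [c] [] else t)
        s.toList := by
  induction L with
  | nil => intro s; rfl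
  | cons c L ih =>
    intro s
    simp only [List.foldl_cons]
    rw [ih]
    congr 1
    by_cases h : PySem.Chars.isIn [c] s.toList = true
    · simp [PySem.Str.isIn_eq, h, PySem.Str.toList_replace]
    · simp [PySem.Str.isIn_eq, h]

lemma acr_set_ofList : PySem.Set.ofList acrRemove = acrRemove := by decide

-- ---- B-side: the streaming tokenizer computes filter-then-split-then-filter ----

-- the finishing step B performs after its loop (and, inline, at each flush)
def acrFin (st : List String × List Char) : List String :=
  if 2 ≤ st.2.length ∧ st.2.any PySem.Chars.isalpha
  then st.1 ++ [String.ofList st.2] else st.1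

-- the token test, boolean form
def acrPc (w : List Char) : Bool := decide (2 ≤ w.length) && w.any PySem.Chars.isalpha

lemma acr_pc_true (cur : List Char) (hp : 2 ≤ cur.length ∧ cur.any PySem.Chars.isalpha = true) :
    acrPc cur = true := by
  simp [acrPc, hp.1, hp.2]

lemma acr_pc_false (cur : List Char) (hp : ¬(2 ≤ cur.length ∧ cur.any PySem.Chars.isalpha = true)) :
    acrPc cur = false := by
  cases hA : acrPc cur with
  | false => rfl
  | true =>
    exfalso
    apply hp
    simpa [acrPc] using hA

-- split₀.go's accumulator is write-only output
lemma acr_go_acc : ∀ (l cur acc_ : List Char) (acc : List (List Char)),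
    PySem.Chars.split₀.go l (cur ++ acc_) acc
      = acc.reverse ++ PySem.Chars.split₀.go l (cur ++ acc_) [] := by
  intro l
  induction l with
  | nil =>
    intro cur acc_ acc
    by_cases h : (cur ++ acc_).isEmpty = true
    · simp [PySem.Chars.split₀.go, h]
    · simp [PySem.Chars.split₀.go, h]
  | cons c t ih =>
    intro cur acc_ acc
    by_cases hs : PySem.Chars.isspace c = true
    · by_cases h : (cur ++ acc_).isEmpty = true
      · simp only [PySem.Chars.split₀.go, hs, if_pos, h]
        have := ih [] [] acc
        simpa using this
      · simp only [PySem.Chars.split₀.go, hs, if_pos, h, if_false, Bool.false_eq_true]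
        have h1 := ih [] [] ((cur ++ acc_).reverse :: acc)
        have h2 := ih [] [] [(cur ++ acc_).reverse]
        simp only [List.append_nil] at h1 h2
        rw [h1, h2]
        simp
    · simp only [PySem.Chars.split₀.go, hs, Bool.false_eq_true, if_false]
      have h1 := ih [] (c :: (cur ++ acc_)) acc
      simpa using h1

lemma acr_go_acc' (l cur : List Char) (acc : List (List Char)) :
    PySem.Chars.split₀.go l cur acc = acc.reverse ++ PySem.Chars.split₀.go l cur [] := by
  simpa using acr_go_acc l cur [] acc

-- the key invariant: B's fold over l, started at (out, cur), followed by the final flush,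
-- equals out ++ the qualified tokens of the drop-filtered remainder (cur pending)
lemma acr_fold_tokenize : ∀ (l : List Char) (out : List String) (cur : List Char),
    acrFin (l.foldl acrStep (out, cur))
      = out ++ ((PySem.Chars.split₀.go (l.filter fun c => !(acrDrop.contains c)) cur.reverse []).filter
          acrPc).map String.ofList := by
  intro l
  induction l with
  | nil =>
    intro out cur
    by_cases h : cur = []
    · subst h
      simp [acrFin, PySem.Chars.split₀.go]
    · have hne : cur.reverse.isEmpty = false := by
        simpa [List.isEmpty_iff] using h
      simp only [List.foldl_nil, List.filter_nil, PySem.Chars.split₀.go, hne,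
        Bool.false_eq_true, if_false, List.reverse_reverse, List.reverse_nil]
      by_cases hp : 2 ≤ cur.length ∧ cur.any PySem.Chars.isalpha
      · simp [acrFin, acrPc, hp.1, hp.2]
      · rw [acrFin, if_neg hp]
        simp [acr_pc_false cur hp]
  | cons c t ih =>
    intro out cur
    by_cases hd : acrDrop.contains c = true
    · simp only [List.foldl_cons, acrStep, hd, if_true, List.filter_cons, Bool.not_eq_true',
        hd, Bool.not_true, Bool.false_eq_true, if_false]
      exact ih out cur
    · by_cases hs : PySem.Chars.isspace c = true
      · simp only [List.foldl_cons, acrStep, hd, Bool.false_eq_true, if_false, hs, if_true,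
          List.filter_cons, Bool.not_eq_true', Bool.not_eq_false', hd, Bool.not_false, if_true]
        by_cases h : cur = []
        · subst h
          simp only [PySem.Chars.split₀.go, hs, if_true, List.reverse_nil, List.isEmpty_nil]
          have := ih out []
          simpa using this
        · have hne : cur.reverse.isEmpty = false := by
            simpa [List.isEmpty_iff] using h
          simp only [PySem.Chars.split₀.go, hs, if_true, hne, Bool.false_eq_true, if_false,
            List.reverse_reverse]
          rw [acr_go_acc' _ [] [cur]]
          simp only [List.reverse_cons, List.reverse_nil, List.nil_append, List.filter_append,
            List.map_append]
          by_cases hp : 2 ≤ cur.length ∧ cur.any PySem.Chars.isalpha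
          · have hpc : acrPc cur = true := acr_pc_true cur hp
            rw [if_pos hp]
            rw [ih (out ++ [String.ofList cur]) []]
            simp [hpc]
          · have hpc : acrPc cur = false := acr_pc_false cur hp
            rw [if_neg hp]
            rw [ih out []]
            simp [hpc]
      · simp only [List.foldl_cons, acrStep, hd, Bool.false_eq_true, if_false, hs,
          List.filter_cons, Bool.not_eq_true', Bool.not_eq_false', hd, Bool.not_false, if_true]
        rw [ih out (cur ++ [c])]
        simp only [PySem.Chars.split₀.go, hs, Bool.false_eq_true, if_false, List.reverse_append,
          List.reverse_cons, List.reverse_nil, List.nil_append, List.singleton_append]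

-- ===== VERDICT (by name: the statement is the Claim_ definition above) =====
theorem acronyms_spec : Claim_equal_acronyms := by
  intro s _
  unfold Spec_acronyms acronyms
  have hBdef : acronyms_alt s = acrFin (s.toList.foldl acrStep ([], [])) := rfl
  rw [hBdef]
  -- A's removal passes produce the drop-filtered string
  have hclean :
      (acrRemove.foldl
        (fun t c =>
          if PySem.Str.isIn (String.ofList [c]) t then PySem.Str.replace t (String.ofList [c]) "" else t)
        s)
      = String.ofList (s.toList.filter (fun c => !(acrDrop.contains c))) := by
    apply String.toList_inj.mp
    rw [acr_foldl_toList]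
    have hstep :
        (fun (t : List Char) (c : Char) =>
          if PySem.Chars.isIn [c] t then PySem.Chars.replace t [c] [] else t)
        = fun t c => t.filter (fun x => x != c) := by
      funext t c; exact acr_step_chars t c
    rw [hstep, acr_foldl_filter]
    simp [acrDrop, acr_set_ofList, PySem.Set.contains]
  rw [hclean]
  -- A's split-and-append loop is a filter over the tokens
  rw [PySem.List.foldl_append_ite_eq_filter
    (fun w => 2 ≤ PySem.Str.len w ∧ (w.toList.map (fun ch => PySem.Chars.isalpha ch)).any id)]
  rw [List.nil_append]
  -- B's fold is the same tokens via the invariant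
  have hB := acr_fold_tokenize s.toList [] []
  simp only [List.reverse_nil, List.nil_append] at hB
  rw [hB]
  -- identify the two token selections
  unfold PySem.Str.split₀ PySem.Chars.split₀
  rw [String.toList_ofList, List.filter_map]
  refine congrArg (List.map String.ofList) ?_
  refine List.filter_congr ?_
  intro w _
  simp only [Function.comp_apply, acrPc, Bool.decide_and, String.toList_ofList]
  have h1 : decide (2 ≤ PySem.Str.len (String.ofList w)) = decide (2 ≤ w.length) := by
    simp [PySem.Str.len_eq]
  have h2 : decide (((w.map (fun ch => PySem.Chars.isalpha ch)).any id) = true)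
      = w.any PySem.Chars.isalpha := by
    rw [List.any_map, Bool.decide_eq_true]
    simp
  rw [h1, h2]
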